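-- pv_equiv track=rewrite | github.com/foodpocket/foodpocket-api | restaurant/models.py | preprocessUsername
-- ===== SOURCE A (Python) =====
-- def preprocessUsername(username: str) -> (str, bool, str):
--     """
--         validate and preprocess username inputed by user
--
--         return
--         1. processed username
--         2. is valid?
--         3. error message
--     """
--
--     # check length
--     if len(username) > 64:
--         return None, False, "Username length exceed 64 characters"
--
--     # check chars, only allow a-zA-Z0-9
--     validChars = "abcdefghijklmnopqrstuvwxyzABCDEFGHIJKLMNOPQRSTUVWXYZ0987654321"
--     for char in username:
--         if char not in validChars:
--             return None, False, "Username contains invalid character(s)"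
--
--     # transfer all chars to lowercase
--     name = str.lower(username)
--
--     return name, True, ""
-- ===== SOURCE B (Python) =====
-- def preprocessUsername(username: str) -> (str, bool, str):
--     if len(username) > 64:
--         return None, False, "Username length exceed 64 characters"
--     out = []
--     for ch in username:
--         o = ord(ch)
--         if 97 <= o <= 122 or 48 <= o <= 57:
--             out.append(ch)
--         elif 65 <= o <= 90:
--             out.append(chr(o + 32))
--         else:
--             return None, False, "Username contains invalid character(s)"
--     return "".join(out), True, ""
-- ===== Notes on version B (the rewrite author's own statement) =====
-- stated objective: alternative
-- what changed: Single fused pass: classifies each character by arithmetic code-point ranges instead of membership in a 62-char alphabet string, and builds the lowercased result during the same pass (ord+32 on uppercase) instead of a separate str.lower stage.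
import Mathlib
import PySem

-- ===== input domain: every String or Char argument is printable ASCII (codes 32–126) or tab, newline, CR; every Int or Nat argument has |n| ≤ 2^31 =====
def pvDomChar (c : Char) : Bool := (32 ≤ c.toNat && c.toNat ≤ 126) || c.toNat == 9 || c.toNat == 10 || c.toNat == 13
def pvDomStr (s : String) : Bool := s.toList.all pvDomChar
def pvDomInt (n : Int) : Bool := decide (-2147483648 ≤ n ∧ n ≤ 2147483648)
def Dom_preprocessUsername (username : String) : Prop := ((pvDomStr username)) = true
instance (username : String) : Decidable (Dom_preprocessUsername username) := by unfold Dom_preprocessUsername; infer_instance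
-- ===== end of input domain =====

-- B fuses validation and lowercasing into one arithmetic code-point pass (no alphabet string, no str.lower stage); equivalence is exact.
-- ===== PORT A =====
def pvValidChars : List Char := "abcdefghijklmnopqrstuvwxyzABCDEFGHIJKLMNOPQRSTUVWXYZ0987654321".toList

-- the 'for char in username' loop with its early return
def pvLoopA (username : String) : List Char → Option String × Bool × String
  | [] => (some (PySem.Str.lower username), true, "")
  | c :: rest =>
      if pvValidChars.contains c = false then
        (none, false, "Username contains invalid character(s)")
      else pvLoopA username rest

def preprocessUsername (username : String) : Option String × Bool × String :=
  if PySem.Str.len username > 64 then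
    (none, false, "Username length exceed 64 characters")
  else
    pvLoopA username username.toList

-- ===== PORT B =====
-- the single pass: 'out' is the accumulator list, early return = none
def pvScanB (acc : List Char) : List Char → Option (List Char)
  | [] => some acc
  | c :: rest =>
      let o := c.toNat
      if (97 ≤ o ∧ o ≤ 122) ∨ (48 ≤ o ∧ o ≤ 57) then pvScanB (acc ++ [c]) rest
      else if 65 ≤ o ∧ o ≤ 90 then pvScanB (acc ++ [Char.ofNat (o + 32)]) rest
      else none

def preprocessUsername_alt (username : String) : Option String × Bool × String :=
  if PySem.Str.len username > 64 then
    (none, false, "Username length exceed 64 characters")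
  else
    match pvScanB [] username.toList with
    | none => (none, false, "Username contains invalid character(s)")
    | some out => (some (String.ofList out), true, "")

-- ===== PRECONDITION & SPEC =====
def Spec_preprocessUsername (username : String) (out : Option String × Bool × String) : Prop := out = preprocessUsername_alt username
instance (username : String) (out : Option String × Bool × String) : Decidable (Spec_preprocessUsername username out) := by unfold Spec_preprocessUsername; infer_instance

-- ===== CLAIM (what is proved, stated in full; the proofs are below) =====
def Claim_equal_preprocessUsername : Prop := ∀ (username : String), Dom_preprocessUsername username → Spec_preprocessUsername username (preprocessUsername username)

-- ===== LEMMAS AND PROOFS =====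

theorem pv_charToNat_inj {c d : Char} (h : c.toNat = d.toNat) : c = d := by
  apply Char.ext; exact UInt32.toNat_inj.mp h

set_option maxRecDepth 20000 in
theorem pv_validChars_toNat :
    pvValidChars.map Char.toNat =
      [97, 98, 99, 100, 101, 102, 103, 104, 105, 106, 107, 108, 109, 110, 111, 112,
       113, 114, 115, 116, 117, 118, 119, 120, 121, 122, 65, 66, 67, 68, 69, 70, 71,
       72, 73, 74, 75, 76, 77, 78, 79, 80, 81, 82, 83, 84, 85, 86, 87, 88, 89, 90,
       48, 57, 56, 55, 54, 53, 52, 51, 50, 49] := by decide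

-- A's alphabet is exactly the three code-point ranges B tests
theorem pv_mem_valid_iff (c : Char) :
    c ∈ pvValidChars ↔
      ((97 ≤ c.toNat ∧ c.toNat ≤ 122) ∨ (48 ≤ c.toNat ∧ c.toNat ≤ 57) ∨
        (65 ≤ c.toNat ∧ c.toNat ≤ 90)) := by
  have hmap : c ∈ pvValidChars ↔ c.toNat ∈ pvValidChars.map Char.toNat := by
    constructor
    · intro h; exact List.mem_map_of_mem h
    · intro h
      obtain ⟨d, hd, he⟩ := List.mem_map.mp h
      exact pv_charToNat_inj he ▸ hd
  rw [hmap, pv_validChars_toNat]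
  simp only [List.mem_cons, List.not_mem_nil, or_false]
  omega

theorem pv_le_iff_toNat_le (c d : Char) : (c ≤ d) ↔ (c.toNat ≤ d.toNat) := by
  rw [show (c ≤ d) = (c.val ≤ d.val) from rfl, UInt32.le_iff_toNat_le]; rfl

theorem pv_lowerChar_low (c : Char)
    (h : (97 ≤ c.toNat ∧ c.toNat ≤ 122) ∨ (48 ≤ c.toNat ∧ c.toNat ≤ 57)) :
    PySem.Chars.lowerChar c = c := by
  have hup : PySem.Chars.isupper c = false := by
    simp only [PySem.Chars.isupper, Bool.and_eq_false_iff, decide_eq_false_iff_not]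
    rw [pv_le_iff_toNat_le, pv_le_iff_toNat_le]
    show ¬ (65 ≤ c.toNat) ∨ ¬ (c.toNat ≤ 90)
    omega
  simp [PySem.Chars.lowerChar, hup]

theorem pv_lowerChar_up (c : Char) (h : 65 ≤ c.toNat ∧ c.toNat ≤ 90) :
    PySem.Chars.lowerChar c = Char.ofNat (c.toNat + 32) := by
  have hup : PySem.Chars.isupper c = true := by
    simp only [PySem.Chars.isupper, Bool.and_eq_true, decide_eq_true_eq]
    rw [pv_le_iff_toNat_le, pv_le_iff_toNat_le]
    exact ⟨by exact h.1, by exact h.2⟩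
  simp [PySem.Chars.lowerChar, hup]

-- B's scan produces the lowercased list exactly when every char is in A's alphabet
theorem pv_scan_eq (cs : List Char) : ∀ acc : List Char,
    pvScanB acc cs =
      (if ∀ c ∈ cs, c ∈ pvValidChars then some (acc ++ PySem.Chars.lower cs) else none) := by
  induction cs with
  | nil => intro acc; simp [pvScanB, PySem.Chars.lower]
  | cons c rest ih =>
      intro acc
      by_cases hc : c ∈ pvValidChars
      · have hall : (∀ x ∈ c :: rest, x ∈ pvValidChars) ↔ (∀ x ∈ rest, x ∈ pvValidChars) := by
          constructor
          · intro h x hx; exact h x (List.mem_cons_of_mem _ hx)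
          · intro h x hx
            rcases List.mem_cons.mp hx with h1 | h1
            · exact h1 ▸ hc
            · exact h x h1
        rcases (pv_mem_valid_iff c).mp hc with h1 | h1 | h1
        · have hstep : pvScanB acc (c :: rest) = pvScanB (acc ++ [c]) rest := by
            simp only [pvScanB]
            rw [if_pos (Or.inl h1)]
          rw [hstep, ih]
          have hlc : PySem.Chars.lowerChar c = c := pv_lowerChar_low c (Or.inl h1)
          by_cases hrest : ∀ x ∈ rest, x ∈ pvValidChars
          · rw [if_pos hrest, if_pos (hall.mpr hrest)]
            simp [PySem.Chars.lower, hlc]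
          · rw [if_neg hrest, if_neg (fun h => hrest (hall.mp h))]
        · have hstep : pvScanB acc (c :: rest) = pvScanB (acc ++ [c]) rest := by
            simp only [pvScanB]
            rw [if_pos (Or.inr h1)]
          rw [hstep, ih]
          have hlc : PySem.Chars.lowerChar c = c := pv_lowerChar_low c (Or.inr h1)
          by_cases hrest : ∀ x ∈ rest, x ∈ pvValidChars
          · rw [if_pos hrest, if_pos (hall.mpr hrest)]
            simp [PySem.Chars.lower, hlc]
          · rw [if_neg hrest, if_neg (fun h => hrest (hall.mp h))]
        · have hstep : pvScanB acc (c :: rest) = pvScanB (acc ++ [Char.ofNat (c.toNat + 32)]) rest := by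
            simp only [pvScanB]
            rw [if_neg (by omega), if_pos h1]
          rw [hstep, ih]
          have hlc : PySem.Chars.lowerChar c = Char.ofNat (c.toNat + 32) := pv_lowerChar_up c h1
          by_cases hrest : ∀ x ∈ rest, x ∈ pvValidChars
          · rw [if_pos hrest, if_pos (hall.mpr hrest)]
            simp [PySem.Chars.lower, hlc]
          · rw [if_neg hrest, if_neg (fun h => hrest (hall.mp h))]
      · have hne : ¬ ∀ x ∈ c :: rest, x ∈ pvValidChars := fun h => hc (h c (List.mem_cons_self ..))
        rw [if_neg hne]
        have hranges := (pv_mem_valid_iff c).not.mp hc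
        simp only [pvScanB]
        rw [if_neg (by omega), if_neg (by omega)]

-- A's loop returns valid iff every char is in the alphabet
theorem pv_loopA_eq (username : String) (cs : List Char) :
    pvLoopA username cs =
      (if ∀ c ∈ cs, c ∈ pvValidChars then
        (some (PySem.Str.lower username), true, "")
      else ((none : Option String), false, "Username contains invalid character(s)")) := by
  induction cs with
  | nil => simp [pvLoopA]
  | cons c rest ih =>
      by_cases hc : c ∈ pvValidChars
      · have hstep : pvLoopA username (c :: rest) = pvLoopA username rest := by
          simp only [pvLoopA]
          rw [if_neg (by simpa using hc)]
        rw [hstep, ih]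
        have hall : (∀ x ∈ c :: rest, x ∈ pvValidChars) ↔ (∀ x ∈ rest, x ∈ pvValidChars) := by
          constructor
          · intro h x hx; exact h x (List.mem_cons_of_mem _ hx)
          · intro h x hx
            rcases List.mem_cons.mp hx with h1 | h1
            · exact h1 ▸ hc
            · exact h x h1
        by_cases hrest : ∀ x ∈ rest, x ∈ pvValidChars
        · rw [if_pos hrest, if_pos (hall.mpr hrest)]
        · rw [if_neg hrest, if_neg (fun h => hrest (hall.mp h))]
      · have hne : ¬ ∀ x ∈ c :: rest, x ∈ pvValidChars := fun h => hc (h c (List.mem_cons_self ..))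
        rw [if_neg hne]
        simp only [pvLoopA]
        rw [if_pos (by simpa using hc)]

theorem pv_mk_lower (s : String) : String.ofList (PySem.Chars.lower s.toList) = PySem.Str.lower s := by
  rw [← PySem.Str.toList_lower, String.ofList_toList]

-- ===== VERDICT (by name: the statement is the Claim_ definition above) =====
theorem preprocessUsername_spec : Claim_equal_preprocessUsername := by
  intro username _
  unfold Spec_preprocessUsername preprocessUsername preprocessUsername_alt
  by_cases hlen : PySem.Str.len username > 64
  · rw [if_pos hlen, if_pos hlen]
  · rw [if_neg hlen, if_neg hlen, pv_loopA_eq, pv_scan_eq]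
    by_cases hv : ∀ c ∈ username.toList, c ∈ pvValidChars
    · rw [if_pos hv, if_pos hv]
      simp [pv_mk_lower]
    · rw [if_neg hv, if_neg hv]
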